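-- pv_equiv track=rewrite | github.com/plerin/solveThePS | 220120/NMK_1201.py | get_solve
-- ===== SOURCE A (Python) =====
-- def get_solve(n: int, m: int, k: int) -> str:
--
--     if n < (m + k - 1) or (m * k) < n:
--         return '-1'
--     else:
--         arr = [str(i) for i in range(k, 0, -1)]
--
--         n -= k
--         m -= 1
--
--         while m:
--             arr.extend([str(i) for i in range(k + (n//m), k, -1)])
--             k += (n//m)
--             n -= (n//m)
--             m -= 1
--
--         return ' '.join(arr)
-- ===== SOURCE B (Python) =====
-- def get_solve(n: int, m: int, k: int) -> str:
--
--     if n < (m + k - 1) or (m * k) < n: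
--         return '-1'
--
--     # closed-form balanced split: first block has size k, the remaining
--     # n-k values go into m-1 blocks, the LAST rem blocks one larger.
--     sizes = [k]
--     if m > 1:
--         base, rem = divmod(n - k, m - 1)
--         sizes += [base] * (m - 1 - rem) + [base + 1] * rem
--
--     out = []
--     cur = 1
--     for s in sizes:
--         out.extend(str(v) for v in range(cur + s - 1, cur - 1, -1))
--         cur += s
--     return ' '.join(out)
-- ===== Notes on version B (the rewrite author's own statement) =====
-- stated objective: alternative
-- what changed: B replaces A's interleaved loop that re-divides the remaining count each iteration (n//m recomputed with mutating n, m, k) by a closed-form balanced split: it precomputes the block-size list ([k] then base/base+1 blocks from one divmod) and then emits descending runs from a running start value.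
import Mathlib
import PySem

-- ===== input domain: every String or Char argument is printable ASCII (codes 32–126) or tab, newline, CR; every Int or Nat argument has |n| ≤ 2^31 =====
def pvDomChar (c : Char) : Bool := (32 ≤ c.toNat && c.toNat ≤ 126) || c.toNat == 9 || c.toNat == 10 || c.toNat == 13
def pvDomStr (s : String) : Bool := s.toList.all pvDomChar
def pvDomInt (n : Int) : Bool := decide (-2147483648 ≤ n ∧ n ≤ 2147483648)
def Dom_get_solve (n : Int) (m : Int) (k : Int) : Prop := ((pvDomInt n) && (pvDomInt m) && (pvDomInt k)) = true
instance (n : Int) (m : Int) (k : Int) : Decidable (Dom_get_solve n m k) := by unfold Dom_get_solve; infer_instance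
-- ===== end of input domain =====

-- B computes the block sizes by one closed-form balanced split (divmod) instead of
-- A's interleaved loop that re-divides the remaining count each iteration; same cost,
-- different decomposition ("alternative").

-- ===== PORT A =====
-- A's while loop: fuel = m.toNat; when m ≤ 0 the Python loop never terminates
-- (those inputs are outside Pre_get_solve), so the fuel guard is a totality device only.
def pvALoop : Nat → Int → Int → Int → List String → List String
  | 0, _, _, _, arr => arr
  | fuel+1, n, m, k, arr =>
      if m = 0 then arr
      else
        let q := PySem.Int.floordiv n m
        pvALoop fuel (n - q) (m - 1) (k + q)
          (arr ++ (PySem.List.pyRange (k + q) k (-1)).map PySem.Int.toStr)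

def get_solve (n : Int) (m : Int) (k : Int) : String :=
  if n < m + k - 1 ∨ m * k < n then "-1"
  else
    let arr := (PySem.List.pyRange k 0 (-1)).map PySem.Int.toStr
    let n' := n - k
    let m' := m - 1
    PySem.Str.join " " (pvALoop m'.toNat n' m' k arr)

-- ===== PORT B =====
def get_solve_alt (n : Int) (m : Int) (k : Int) : String :=
  if n < m + k - 1 ∨ m * k < n then "-1"
  else
    let sizes : List Int :=
      if 1 < m then
        let base := PySem.Int.floordiv (n - k) (m - 1)
        let rem := PySem.Int.mod (n - k) (m - 1)
        [k] ++ List.replicate (m - 1 - rem).toNat base ++ List.replicate rem.toNat (base + 1)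
      else [k]
    let st := sizes.foldl
      (fun (acc : List String × Int) s =>
        (acc.1 ++ (PySem.List.pyRange (acc.2 + s - 1) (acc.2 - 1) (-1)).map PySem.Int.toStr,
         acc.2 + s)) ([], 1)
    PySem.Str.join " " st.1

-- ===== PRECONDITION & SPEC =====
-- Pre_ excludes exactly the inputs on which A never returns: when m ≤ 0 and the
-- feasibility guard passes, A's `while m` loop decrements m past 0 and diverges.
def Pre_get_solve (n : Int) (m : Int) (k : Int) : Prop :=
  1 ≤ m ∨ n < m + k - 1 ∨ m * k < n
instance (n : Int) (m : Int) (k : Int) : Decidable (Pre_get_solve n m k) := by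
  unfold Pre_get_solve; infer_instance
def pvWitness_get_solve : Int × Int × Int := (5, 2, 3)

def Spec_get_solve (n : Int) (m : Int) (k : Int) (out : String) : Prop := out = get_solve_alt n m k
instance (n : Int) (m : Int) (k : Int) (out : String) : Decidable (Spec_get_solve n m k out) := by
  unfold Spec_get_solve; infer_instance

-- ===== CLAIM (what is proved, stated in full; the proofs are below) =====
def Claim_equal_get_solve : Prop := ∀ (n : Int) (m : Int) (k : Int), Dom_get_solve n m k → Pre_get_solve n m k → Spec_get_solve n m k (get_solve n m k)

-- ===== LEMMAS AND PROOFS =====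

-- one descending run: the values b, b-1, …, a+1 as strings
def pvBlock (a b : Int) : List String :=
  (PySem.List.pyRange b a (-1)).map PySem.Int.toStr

-- what A's loop appends, fuel/counter merged (m = fuel)
def pvABlocks : Nat → Int → Int → List String
  | 0, _, _ => []
  | M+1, n, k =>
      pvBlock k (k + PySem.Int.floordiv n ((M:Int)+1)) ++
      pvABlocks M (n - PySem.Int.floordiv n ((M:Int)+1))
                  (k + PySem.Int.floordiv n ((M:Int)+1))

lemma pvALoop_eq_blocks (M : Nat) : ∀ (n k : Int) (arr : List String),
    pvALoop M n (M : Int) k arr = arr ++ pvABlocks M n k := by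
  induction M with
  | zero => intro n k arr; simp [pvALoop, pvABlocks]
  | succ M ih =>
      intro n k arr
      have hne : ((M : Int) + 1) ≠ 0 := by positivity
      simp only [pvALoop, pvABlocks, Nat.cast_succ, pvBlock]
      rw [if_neg hne, show (M : Int) + 1 - 1 = (M : Int) by ring, ih]
      simp [List.append_assoc]

-- what B's emission loop produces from a size list and a running start value
def pvEmit : List Int → Int → List String
  | [], _ => []
  | s :: ss, cur => pvBlock (cur - 1) (cur + s - 1) ++ pvEmit ss (cur + s)

lemma pvFoldl_emit (sizes : List Int) : ∀ (out : List String) (cur : Int),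
    (sizes.foldl
      (fun (acc : List String × Int) s =>
        (acc.1 ++ (PySem.List.pyRange (acc.2 + s - 1) (acc.2 - 1) (-1)).map PySem.Int.toStr,
         acc.2 + s)) (out, cur)).1 = out ++ pvEmit sizes cur := by
  induction sizes with
  | nil => intro out cur; simp [pvEmit]
  | cons s ss ih =>
      intro out cur
      simp only [List.foldl_cons, pvEmit, pvBlock]
      rw [ih]
      simp [List.append_assoc]

-- B's size list for M blocks holding n items (M ≥ 1)
def pvSizes (M : Nat) (n : Int) : List Int :=
  List.replicate (M - (PySem.Int.mod n (M:Int)).toNat) (PySem.Int.floordiv n (M:Int)) ++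
  List.replicate (PySem.Int.mod n (M:Int)).toNat (PySem.Int.floordiv n (M:Int) + 1)

-- key: A's repeated floor division produces exactly the balanced split,
-- remainder distributed to the LAST rem blocks
lemma pvKey (M : Nat) : ∀ (n k : Int), 0 ≤ n →
    pvABlocks (M+1) n k = pvEmit (pvSizes (M+1) n) (k+1) := by
  induction M with
  | zero =>
      intro n k hn
      rw [pvABlocks, show ((0:Nat):Int) + 1 = 1 by norm_num]
      have hd : PySem.Int.floordiv n ((1:Nat):Int) = n := by
        rw [show ((1:Nat):Int) = 1 by norm_num,
            PySem.Int.floordiv_eq_ediv_of_pos (by norm_num)]; simp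
      have hm : PySem.Int.mod n ((1:Nat):Int) = 0 := by
        rw [show ((1:Nat):Int) = 1 by norm_num,
            PySem.Int.mod_eq_emod_of_pos (by norm_num)]; simp
      simp only [pvSizes, hm, show ((1:Nat):Int) = 1 by norm_num] at *
      rw [hd]
      simp [pvEmit, pvABlocks]
      congr 1
      ring
  | succ M ih =>
      intro n k hn
      rw [pvABlocks, show ((M+1:Nat):Int) + 1 = (M:Int) + 2 by push_cast; ring]
      simp only [pvSizes]
      rw [show ((M+1+1:Nat):Int) = (M:Int) + 2 by push_cast; ring]
      have hMpos : (0:Int) < (M:Int) + 2 := by positivity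
      set b := PySem.Int.floordiv n ((M:Int)+2) with hb
      set r := PySem.Int.mod n ((M:Int)+2) with hr
      have hbe : b = n / ((M:Int)+2) := by
        rw [hb, PySem.Int.floordiv_eq_ediv_of_pos hMpos]
      have hre : r = n % ((M:Int)+2) := by
        rw [hr, PySem.Int.mod_eq_emod_of_pos hMpos]
      have h0 := Int.ediv_add_emod n ((M:Int)+2)
      have hnbr : n = b * ((M:Int)+2) + r := by
        rw [hbe, hre]; linarith [mul_comm (n / ((M:Int)+2)) ((M:Int)+2)]
      have hr0 : 0 ≤ r := by rw [hre]; exact Int.emod_nonneg n (by omega)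
      have hrlt : r < (M:Int) + 2 := by rw [hre]; exact Int.emod_lt_of_pos n hMpos
      have hb0 : 0 ≤ b := by rw [hbe]; exact Int.ediv_nonneg hn (by omega)
      have hn2 : (0:Int) ≤ n - b := by nlinarith
      have hsplit : (M+1+1) - r.toNat = (M+1 - r.toNat) + 1 := by omega
      rw [hsplit, List.replicate_succ, List.cons_append]
      simp only [pvEmit]
      rw [show k + 1 - 1 = k by ring, show k + 1 + b - 1 = k + b by ring]
      congr 1
      rw [ih (n-b) (k+b) hn2, show k + 1 + b = k + b + 1 by ring]
      congr 1
      -- pvSizes (M+1) (n-b) = replicate (M+1-r.toNat) b ++ replicate r.toNat (b+1)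
      have hM1pos : (0:Int) < ((M+1:Nat):Int) := by push_cast; positivity
      simp only [pvSizes]
      by_cases hcase : r < (M:Int) + 1
      · have hb2 : PySem.Int.floordiv (n-b) ((M+1:Nat):Int) = b := by
          rw [PySem.Int.floordiv_eq_ediv_of_pos hM1pos,
              show ((M+1:Nat):Int) = (M:Int)+1 by push_cast; ring,
              show n - b = r + ((M:Int)+1) * b by linarith,
              Int.add_mul_ediv_left _ _ (by omega : ((M:Int)+1) ≠ 0),
              Int.ediv_eq_zero_of_lt hr0 (by omega)]
          ring
        have hr2 : PySem.Int.mod (n-b) ((M+1:Nat):Int) = r := by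
          rw [PySem.Int.mod_eq_emod_of_pos hM1pos,
              show ((M+1:Nat):Int) = (M:Int)+1 by push_cast; ring,
              show n - b = r + ((M:Int)+1) * b by linarith,
              Int.add_mul_emod_self_left]
          exact Int.emod_eq_of_lt hr0 (by omega)
        rw [hb2, hr2]
      · have hreq : r = (M:Int) + 1 := by omega
        have hfac : n - b = (b+1) * ((M:Int)+1) := by
          rw [hreq] at hnbr; linear_combination hnbr
        have hb2 : PySem.Int.floordiv (n-b) ((M+1:Nat):Int) = b + 1 := by
          rw [PySem.Int.floordiv_eq_ediv_of_pos hM1pos,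
              show ((M+1:Nat):Int) = (M:Int)+1 by push_cast; ring, hfac]
          exact Int.mul_ediv_cancel _ (by omega)
        have hr2 : PySem.Int.mod (n-b) ((M+1:Nat):Int) = 0 := by
          rw [PySem.Int.mod_eq_emod_of_pos hM1pos,
              show ((M+1:Nat):Int) = (M:Int)+1 by push_cast; ring, hfac]
          simp [Int.mul_emod_left, Int.mul_emod_right]
        rw [hb2, hr2]
        have hrt : r.toNat = M + 1 := by omega
        simp [hrt]

-- ===== VERDICT (by name: the statement is the Claim_ definition above) =====
theorem get_solve_spec : Claim_equal_get_solve := by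
  intro n m k _ hpre
  unfold Spec_get_solve get_solve get_solve_alt
  by_cases hg : n < m + k - 1 ∨ m * k < n
  · simp [hg]
  · simp only [if_neg hg]
    have hm1 : 1 ≤ m := by
      rcases hpre with h | h | h
      · exact h
      · exact absurd (Or.inl h) hg
      · exact absurd (Or.inr h) hg
    push_neg at hg
    have hnk : 0 ≤ n - k := by omega
    by_cases hm : 1 < m
    · -- m ≥ 2: compare via the key lemma
      set M : Nat := (m - 2).toNat with hM
      have hmt : (m - 1).toNat = M + 1 := by omega
      have hcast : ((M + 1 : Nat) : Int) = m - 1 := by push_cast; omega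
      simp only [if_pos hm]
      rw [hmt, ← hcast, pvALoop_eq_blocks, pvFoldl_emit, List.nil_append]
      congr 1
      rw [pvKey M (n - k) k hnk]
      simp only [List.cons_append, List.nil_append, pvEmit]
      rw [show (1:Int) - 1 = 0 by ring, show (1:Int) + k - 1 = k by ring,
          show (1:Int) + k = k + 1 by ring]
      congr 1
      -- the size lists agree: Int vs Nat subtraction for the block count
      have hM1pos : (0:Int) < ((M+1:Nat):Int) := by push_cast; positivity
      have hrem0 : 0 ≤ PySem.Int.mod (n-k) ((M+1:Nat):Int) := by
        rw [PySem.Int.mod_eq_emod_of_pos hM1pos]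
        exact Int.emod_nonneg _ (by omega)
      have hremlt : PySem.Int.mod (n-k) ((M+1:Nat):Int) < ((M+1:Nat):Int) := by
        rw [PySem.Int.mod_eq_emod_of_pos hM1pos]
        exact Int.emod_lt_of_pos _ hM1pos
      have hcnt : ((((M+1:Nat):Int)) - PySem.Int.mod (n-k) ((M+1:Nat):Int)).toNat
          = (M+1) - (PySem.Int.mod (n-k) ((M+1:Nat):Int)).toNat := by omega
      rw [hcnt]
      simp only [pvSizes]
    · -- m = 1: the while loop never runs; B's sizes = [k]
      have hm1' : m = 1 := by omega
      subst hm1'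
      simp only [if_neg (lt_irrefl (1:Int))]
      rw [show ((1:Int) - 1).toNat = 0 by decide]
      rw [pvFoldl_emit]
      simp [pvALoop, pvEmit, pvBlock]
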